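-- pv_equiv track=rewrite | github.com/PacktPublishing/Python-Web-Scraping-Cookbook | modules/sojobs/buildgrams.py | build_2grams
-- ===== SOURCE A (Python) =====
-- def build_2grams(tokens, patterns):
--     results = []
--     left_token = None
--     for i, t in enumerate(tokens):
--         right_token = t
--         if right_token.lower() == "web":
--             pass
--         if left_token is None:
--             left_token = t
--             continue
--
--
--
--         if left_token.lower() in patterns:
--             right = patterns[left_token.lower()]
--             if right_token.lower() in right:
--                 results.append(left_token + right[right_token.lower()] + right_token)
--                 left_token = None
--             else:
--                 results.append(left_token)
--                 left_token = right_token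
--         else:
--             results.append(left_token)
--             left_token = right_token
--
--     if left_token is not None:
--         results.append(left_token)
--     return results
-- ===== SOURCE B (Python) =====
-- def build_2grams(tokens, patterns):
--     results = []
--     i = 0
--     n = len(tokens)
--     while i < n:
--         left = tokens[i]
--         if i + 1 < n:
--             right = tokens[i + 1]
--             seps = patterns.get(left.lower())
--             if seps is not None and right.lower() in seps:
--                 results.append(left + seps[right.lower()] + right)
--                 i += 2
--                 continue
--         results.append(left)
--         i += 1
--     return results
-- ===== Notes on version B (the rewrite author's own statement) =====
-- stated objective: simpler
-- what changed: Replaces A's pending-left_token state machine (with end-of-loop flush and a dead 'web' check) by a direct index-lookahead loop that looks at tokens[i] and tokens[i+1], emitting the bigram and skipping two positions on a match.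
import Mathlib
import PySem

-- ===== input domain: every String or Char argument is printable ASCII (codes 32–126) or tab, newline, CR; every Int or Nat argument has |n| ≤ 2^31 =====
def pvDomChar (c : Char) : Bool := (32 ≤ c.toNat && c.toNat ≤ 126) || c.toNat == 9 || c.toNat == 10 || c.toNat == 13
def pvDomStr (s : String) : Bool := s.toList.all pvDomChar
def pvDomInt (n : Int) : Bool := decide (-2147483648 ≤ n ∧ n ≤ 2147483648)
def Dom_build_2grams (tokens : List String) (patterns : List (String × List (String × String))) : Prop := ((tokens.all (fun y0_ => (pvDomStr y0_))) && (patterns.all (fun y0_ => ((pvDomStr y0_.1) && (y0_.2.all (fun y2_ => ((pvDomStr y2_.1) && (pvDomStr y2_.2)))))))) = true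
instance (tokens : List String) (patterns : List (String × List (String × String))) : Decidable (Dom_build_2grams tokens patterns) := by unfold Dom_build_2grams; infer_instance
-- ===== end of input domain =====

-- B replaces A's pending-left_token state machine by an index/lookahead recursion (objective: simpler; same cost).

-- ===== PORT A =====
-- A: a fold over the tokens carrying (results, left_token); the "web" check in A is a no-op (pass) and is omitted.
def build_2gramsStep (patterns : List (String × List (String × String)))
    (st : List String × Option String) (t : String) : List String × Option String :=
  let right_token := t
  match st.2 with
  | none => (st.1, some t)
  | some lt =>
    match PySem.Dict.get? (PySem.Dict.mk patterns) (PySem.Str.lower lt) with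
    | some right =>
      match PySem.Dict.get? (PySem.Dict.mk right) (PySem.Str.lower right_token) with
      | some sep => (st.1 ++ [lt ++ sep ++ right_token], none)
      | none => (st.1 ++ [lt], some right_token)
    | none => (st.1 ++ [lt], some right_token)

def build_2grams (tokens : List String) (patterns : List (String × List (String × String))) : List String :=
  let st := tokens.foldl (build_2gramsStep patterns) ([], none)
  match st.2 with
  | some lt => st.1 ++ [lt]
  | none => st.1

-- ===== PORT B =====
-- B: look at the current token and, if present, the next one; on a pattern match emit the bigram and skip both.
def build_2gramsAltGo (patterns : List (String × List (String × String))) : List String → List String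
  | [] => []
  | [left] => [left]
  | left :: right :: rest' =>
    match PySem.Dict.get? (PySem.Dict.mk patterns) (PySem.Str.lower left) with
    | some seps =>
      match PySem.Dict.get? (PySem.Dict.mk seps) (PySem.Str.lower right) with
      | some sep => (left ++ sep ++ right) :: build_2gramsAltGo patterns rest'
      | none => left :: build_2gramsAltGo patterns (right :: rest')
    | none => left :: build_2gramsAltGo patterns (right :: rest')

def build_2grams_alt (tokens : List String) (patterns : List (String × List (String × String))) : List String :=
  build_2gramsAltGo patterns tokens

-- ===== PRECONDITION & SPEC =====
def Spec_build_2grams (tokens : List String) (patterns : List (String × List (String × String))) (out : List String) : Prop := out = build_2grams_alt tokens patterns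
instance (tokens : List String) (patterns : List (String × List (String × String))) (out : List String) : Decidable (Spec_build_2grams tokens patterns out) := by unfold Spec_build_2grams; infer_instance

-- ===== CLAIM (what is proved, stated in full; the proofs are below) =====
def Claim_equal_build_2grams : Prop := ∀ (tokens : List String) (patterns : List (String × List (String × String))), Dom_build_2grams tokens patterns → Spec_build_2grams tokens patterns (build_2grams tokens patterns)

-- ===== LEMMAS AND PROOFS =====

-- flush of A's final state
def build_2gramsFlush (st : List String × Option String) : List String :=
  match st.2 with
  | some lt => st.1 ++ [lt]
  | none => st.1

-- Invariant: running A's fold from (acc, some lt) over l and flushing gives acc ++ B's answer on (lt :: l).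
theorem build_2grams_inv (patterns : List (String × List (String × String))) :
    ∀ (n : Nat) (l : List String) (acc : List String) (lt : String), l.length ≤ n →
      build_2gramsFlush (l.foldl (build_2gramsStep patterns) (acc, some lt))
        = acc ++ build_2gramsAltGo patterns (lt :: l) := by
  intro n
  induction n with
  | zero =>
    intro l acc lt h
    have : l = [] := List.eq_nil_of_length_eq_zero (Nat.le_zero.mp h)
    subst this
    simp [build_2gramsFlush, build_2gramsAltGo]
  | succ n ih =>
    intro l acc lt h
    cases l with
    | nil => simp [build_2gramsFlush, build_2gramsAltGo]
    | cons t l' =>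
      simp only [List.foldl_cons, build_2gramsAltGo, build_2gramsStep]
      cases hp : PySem.Dict.get? (PySem.Dict.mk patterns) (PySem.Str.lower lt) with
      | none =>
        simp only [hp]
        rw [ih l' (acc ++ [lt]) t (by simpa using Nat.le_of_succ_le_succ h)]
        simp
      | some seps =>
        simp only [hp]
        cases hs : PySem.Dict.get? (PySem.Dict.mk seps) (PySem.Str.lower t) with
        | none =>
          simp only [hs]
          rw [ih l' (acc ++ [lt]) t (by simpa using Nat.le_of_succ_le_succ h)]
          simp
        | some sep =>
          simp only [hs]
          cases l' with
          | nil => simp [build_2gramsFlush, build_2gramsAltGo]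
          | cons t' l'' =>
            simp only [List.foldl_cons, build_2gramsStep]
            rw [ih l'' (acc ++ [lt ++ sep ++ t]) t'
              (by simp at h; omega)]
            simp

-- ===== VERDICT (by name: the statement is the Claim_ definition above) =====
theorem build_2grams_spec : Claim_equal_build_2grams := by
  intro tokens patterns _
  unfold Spec_build_2grams build_2grams build_2grams_alt
  cases tokens with
  | nil => simp [build_2gramsAltGo]
  | cons t l =>
    have := build_2grams_inv patterns l.length l [] t le_rfl
    simpa [build_2gramsFlush, build_2gramsStep] using this
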